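-- pv_equiv track=rewrite | github.com/iamzin/Study-Algorithm | programmers/기본수학/[12938_기본수학_최고의집합]천재승/[12938_기본수학_최고의집합]천재승.py | solution
-- ===== SOURCE A (Python) =====
-- def solution(n, s):
--     answer = []
--
--     #고르게 분포될 값을 구한다.
--     a=s//n
--     if a==0:
--         return [-1]
--     #남은 값은 뒤에서 앞으로 1씩 뿌려준다.
--     b=s%n
--
--     for i in range(n):
--         answer.append(a)
--
--     for i in range(b):
--         answer[n-1-i]+=1
--
--     return answer
-- ===== SOURCE B (Python) =====
-- def solution(n, s):
--     if s // n == 0: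
--         return [-1]
--
--     # Greedy single pass: each position takes the floor-average of the remaining
--     # sum over the remaining count; the remainders self-balance into a's then a+1's.
--     answer = []
--     m, r = n, s
--     while m > 0:
--         q = r // m
--         answer.append(q)
--         r -= q
--         m -= 1
--     return answer
-- ===== Notes on version B (the rewrite author's own statement) =====
-- stated objective: alternative
-- what changed: Replaces A's two staged passes (build a uniform list of s//n, then increment the last s%n entries in place) with a single greedy pass: each position takes the floor-average of the remaining sum over the remaining count, which provably yields the same a..a,a+1..a+1 list without ever computing s%n or revisiting the list.
import Mathlib
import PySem

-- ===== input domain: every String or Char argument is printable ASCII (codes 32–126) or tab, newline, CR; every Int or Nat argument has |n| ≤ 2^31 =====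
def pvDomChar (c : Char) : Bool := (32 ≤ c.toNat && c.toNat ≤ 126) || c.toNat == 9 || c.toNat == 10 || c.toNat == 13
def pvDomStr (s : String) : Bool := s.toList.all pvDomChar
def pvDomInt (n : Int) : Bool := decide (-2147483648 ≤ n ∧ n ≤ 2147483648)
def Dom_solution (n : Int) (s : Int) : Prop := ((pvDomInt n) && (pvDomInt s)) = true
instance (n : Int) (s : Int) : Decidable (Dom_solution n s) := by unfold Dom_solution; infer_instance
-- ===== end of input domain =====

-- B distributes the sum in one greedy pass (each position takes the floor-average of the
-- remaining sum over the remaining count) instead of A's two staged passes; same value on all n ≠ 0.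

-- ===== PORT A =====
-- answer[n-1-i] += 1 : read with pyGetD / write with pySetD; exact because the loop's
-- index n-1-i is always in range when the loop body runs (0 ≤ i < b = s % n < n).
def solution (n : Int) (s : Int) : List Int :=
  let a := PySem.Int.floordiv s n
  if a = 0 then [-1]
  else
    let b := PySem.Int.mod s n
    let answer := (PySem.List.pyRange 0 n 1).foldl (fun acc _ => acc ++ [a]) []
    (PySem.List.pyRange 0 b 1).foldl
      (fun acc i => PySem.List.pySetD acc (n - 1 - i) (PySem.List.pyGetD acc (n - 1 - i) 0 + 1)) answer

-- ===== PORT B =====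
-- B's while loop over state (m, r): each iteration emits r // m and updates the state;
-- ported as the structural recursion on m
def solutionGo (m : Int) (r : Int) : List Int :=
  if _h : m ≤ 0 then []
  else PySem.Int.floordiv r m :: solutionGo (m - 1) (r - PySem.Int.floordiv r m)
termination_by m.toNat
decreasing_by omega

def solution_alt (n : Int) (s : Int) : List Int :=
  if PySem.Int.floordiv s n = 0 then [-1]
  else solutionGo n s

-- ===== PRECONDITION & SPEC =====
-- Python A raises ZeroDivisionError at n = 0 (s // n); excluded.
def Pre_solution (n : Int) (s : Int) : Prop := n ≠ 0
instance (n : Int) (s : Int) : Decidable (Pre_solution n s) := by unfold Pre_solution; infer_instance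
def pvWitness_solution : Int × Int := (2, 9)

def Spec_solution (n : Int) (s : Int) (out : List Int) : Prop := out = solution_alt n s
instance (n : Int) (s : Int) (out : List Int) : Decidable (Spec_solution n s out) := by unfold Spec_solution; infer_instance

-- ===== CLAIM (what is proved, stated in full; the proofs are below) =====
def Claim_equal_solution : Prop := ∀ (n : Int) (s : Int), Dom_solution n s → Pre_solution n s → Spec_solution n s (solution n s)

-- ===== LEMMAS AND PROOFS =====

-- A's first loop: appending a once per element of any list gives init ++ replicate
theorem foldl_append_const {α β : Type} (l : List β) (x : α) (init : List α) :
    l.foldl (fun acc _ => acc ++ [x]) init = init ++ List.replicate l.length x := by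
  induction l generalizing init with
  | nil => simp
  | cons h t ih => simp [List.foldl, ih, List.replicate_succ]

-- the in-range read during A's second loop
theorem pyGetD_block {m k : Nat} (a : Int) (hk : k < m) :
    PySem.List.pyGetD (List.replicate (m - k) a ++ List.replicate k (a + 1)) ((m : Int) - 1 - (k : Int)) 0 = a := by
  have h1 : ((m : Int) - 1 - (k : Int)) = ((m - 1 - k : Nat) : Int) := by omega
  rw [h1, PySem.List.pyGetD_natCast]
  have hlt : m - 1 - k < m - k := by omega
  rw [List.getD_append _ _ _ _ (by simpa using hlt)]
  simp [List.getD, hlt]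

-- the in-range write during A's second loop
theorem pySetD_block {m k : Nat} (a : Int) (hk : k < m) :
    PySem.List.pySetD (List.replicate (m - k) a ++ List.replicate k (a + 1)) ((m : Int) - 1 - (k : Int)) (a + 1)
      = List.replicate (m - (k + 1)) a ++ List.replicate (k + 1) (a + 1) := by
  have h1 : ((m : Int) - 1 - (k : Int)) = ((m - 1 - k : Nat) : Int) := by omega
  rw [h1, PySem.List.pySetD_natCast]
  have hlt : m - 1 - k < m - k := by omega
  rw [List.set_append_left _ _ (by simpa using hlt)]
  have : (List.replicate (m - k) a).set (m - 1 - k) (a + 1)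
      = List.replicate (m - (k + 1)) a ++ [a + 1] := by
    have hmk : m - k = (m - (k + 1)) + 1 := by omega
    rw [hmk, List.replicate_succ' (n := m - (k + 1))]
    rw [List.set_append_right _ _ (by simp; omega)]
    have hidx : m - 1 - k - (List.replicate (m - (k + 1)) a).length = 0 := by simp; omega
    rw [hidx]
    simp
  rw [this, List.append_assoc]
  simp [List.replicate_succ]

-- A's second loop, b iterations starting from a uniform list of length m
theorem second_loop (m : Nat) (a : Int) :
    ∀ k : Nat, k ≤ m →
    (PySem.List.pyRange 0 (k : Int) 1).foldl
        (fun acc i => PySem.List.pySetD acc ((m : Int) - 1 - i) (PySem.List.pyGetD acc ((m : Int) - 1 - i) 0 + 1))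
        (List.replicate m a)
      = List.replicate (m - k) a ++ List.replicate k (a + 1) := by
  intro k
  induction k with
  | zero => intro _; simp [PySem.List.pyRange_one_eq_nil]
  | succ k ih =>
    intro hk
    have hk' : k ≤ m := by omega
    have hcast : ((k + 1 : Nat) : Int) = (k : Int) + 1 := by push_cast; ring
    rw [hcast, PySem.List.pyRange_one_succ_right (by positivity), List.foldl_append, ih hk']
    simp only [List.foldl]
    rw [pyGetD_block a (by omega), pySetD_block a (by omega)]

-- A's value in closed form (n > 0)
theorem solution_closed (n s : Int) (hn : 0 < n) :
    solution n s = if PySem.Int.floordiv s n = 0 then [-1]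
      else List.replicate (n - PySem.Int.mod s n).toNat (PySem.Int.floordiv s n)
        ++ List.replicate (PySem.Int.mod s n).toNat (PySem.Int.floordiv s n + 1) := by
  unfold solution
  by_cases ha : PySem.Int.floordiv s n = 0
  · simp [ha]
  · simp only [ha, if_false]
    set a := PySem.Int.floordiv s n with hadef
    set b := PySem.Int.mod s n with hbdef
    have hb0 : 0 ≤ b := PySem.Int.mod_nonneg s hn
    have hbn : b < n := PySem.Int.mod_lt s hn
    have hm : ((n.toNat : Int)) = n := by omega
    have hkb : ((b.toNat : Int)) = b := by omega
    have hfirst : (PySem.List.pyRange 0 n 1).foldl (fun acc _ => acc ++ [a]) []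
        = List.replicate n.toNat a := by
      rw [foldl_append_const]
      simp [PySem.List.length_pyRange_one]
    rw [hfirst]
    have := second_loop n.toNat a b.toNat (by omega)
    rw [hm, hkb] at this
    rw [this]
    have h3 : (n - b).toNat = n.toNat - b.toNat := by omega
    rw [h3]

-- B's recursion in closed form: go emits the same a..a,a+1..a+1 block (m > 0)
theorem go_closed : ∀ (m : Nat) (r : Int), 0 < m →
    solutionGo (m : Int) r
      = List.replicate (m - (PySem.Int.mod r m).toNat) (PySem.Int.floordiv r m)
        ++ List.replicate (PySem.Int.mod r m).toNat (PySem.Int.floordiv r m + 1) := by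
  intro m
  induction m with
  | zero => intro r h; omega
  | succ m ih =>
    intro r _
    have hmpos : (0:Int) < (m + 1 : Nat) := by positivity
    set a := PySem.Int.floordiv r ((m + 1 : Nat) : Int) with hadef
    set b := PySem.Int.mod r ((m + 1 : Nat) : Int) with hbdef
    have hb0 : 0 ≤ b := PySem.Int.mod_nonneg r hmpos
    have hbn : b < (m + 1 : Nat) := PySem.Int.mod_lt r hmpos
    have hsplit : a * ((m + 1 : Nat) : Int) + b = r := by
      have := PySem.Int.floordiv_mul_add_mod r ((m + 1 : Nat) : Int)
      linarith [this]
    rw [solutionGo]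
    simp only [dif_neg (by push_cast; omega : ¬ ((m + 1 : Nat) : Int) ≤ 0)]
    rw [← hadef]
    rcases Nat.eq_zero_or_pos m with hm0 | hmpos'
    · -- m = 0 : the recursive call returns [], and b = r % 1 = 0
      subst hm0
      have hb : b = 0 := by omega
      rw [solutionGo]
      simp [hb]
    · -- m > 0 : apply the IH to the remainder r - a
      have hrec := ih (r - a) hmpos'
      -- compute (r - a) // m and (r - a) % m from r - a = a * m + b
      have hra : r - a = a * (m : Int) + b := by push_cast at hsplit ⊢; linarith
      have hmZ : (0:Int) < (m : Nat) := by exact_mod_cast hmpos'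
      have hfd : PySem.Int.floordiv (r - a) (m : Nat) = (r - a) / (m : Nat) :=
        PySem.Int.floordiv_eq_ediv_of_pos hmZ
      have hmd : PySem.Int.mod (r - a) (m : Nat) = (r - a) % (m : Nat) :=
        PySem.Int.mod_eq_emod_of_pos hmZ
      have hstep : ((m + 1 : Nat) : Int) - 1 = (m : Int) := by push_cast; ring
      rw [hstep]
      by_cases hbm : b < (m : Int)
      · -- remainder stays b, quotient stays a
        have hq : (r - a) / (m : Int) = a := by
          rw [hra, add_comm, Int.add_mul_ediv_right _ _ (by omega : (m:Int) ≠ 0),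
              Int.ediv_eq_zero_of_lt hb0 hbm]
          ring
        have hr : (r - a) % (m : Int) = b := by
          rw [hra, add_comm, Int.add_mul_emod_self_right, Int.emod_eq_of_lt hb0 hbm]
        rw [hrec, hfd, hmd, hq, hr]
        have hcount : (m + 1) - b.toNat = (m - b.toNat) + 1 := by omega
        rw [hcount, List.replicate_succ]
        simp
      · -- b = m : the tail is uniformly a + 1
        have hbm' : b = (m : Int) := by omega
        have hq : (r - a) / (m : Int) = a + 1 := by
          rw [hra, hbm', add_comm, Int.add_mul_ediv_right _ _ (by omega : (m:Int) ≠ 0),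
              Int.ediv_self (by omega : (m:Int) ≠ 0)]
          ring
        have hr : (r - a) % (m : Int) = 0 := by
          rw [hra, hbm', add_comm, Int.add_mul_emod_self_right, Int.emod_self]
        rw [hrec, hfd, hmd, hq, hr]
        have hb' : b.toNat = m := by omega
        simp [hb', List.replicate_succ]

theorem solution_spec_aux (n s : Int) (hn : n ≠ 0) : solution n s = solution_alt n s := by
  unfold solution_alt
  by_cases ha : PySem.Int.floordiv s n = 0
  · simp only [ha, if_pos]
    unfold solution
    simp [ha]
  · simp only [ha, if_false]
    rcases lt_or_gt_of_ne hn with hneg | hpos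
    · -- n < 0 : A's loops are empty, B's recursion stops immediately → both []
      have hb := PySem.Int.mod_neg_bounds s hneg
      unfold solution
      simp only [ha, if_false]
      rw [PySem.List.pyRange_one_eq_nil (by omega), PySem.List.pyRange_one_eq_nil (by omega)]
      rw [solutionGo]
      simp [le_of_lt hneg]
    · -- n > 0 : both equal the closed-form block
      have hm : ((n.toNat : Int)) = n := by omega
      have := go_closed n.toNat s (by omega)
      rw [hm] at this
      rw [solution_closed n s hpos, this]
      have hb0 : 0 ≤ PySem.Int.mod s n := PySem.Int.mod_nonneg s hpos
      have hbn : PySem.Int.mod s n < n := PySem.Int.mod_lt s hpos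
      have h3 : (n - PySem.Int.mod s n).toNat = n.toNat - (PySem.Int.mod s n).toNat := by omega
      simp [ha, h3]

-- ===== VERDICT (by name: the statement is the Claim_ definition above) =====
theorem solution_spec : Claim_equal_solution := by
  intro n s _ hpre
  exact solution_spec_aux n s hpre
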